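-- pv_equiv track=rewrite | github.com/jsc-masshtab/vdi-server | backend/vdi_server/vdi/utils.py | prepare_bulk_insert
-- ===== SOURCE A (Python) =====
-- from typing import List
--
-- def prepare_bulk_insert(items: List[dict]):
--     placeholders = []
--     values = []
--     offset = 0
--     for dic in items:
--         numbers = [f'${offset+i+1}' for i, _ in enumerate(dic)]
--         offset += len(dic)
--         numbers = ', '.join(numbers)
--         placeholders.append(f'({numbers})')
--         values.extend(dic.values())
--     keys = ', '.join(items[0].keys())
--     keys = f'({keys})'
--     placeholders = ', '.join(placeholders)
--     return keys, placeholders, values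
-- ===== SOURCE B (Python) =====
-- from typing import List
--
-- def prepare_bulk_insert(items: List[dict]):
--     starts = [sum(len(d) for d in items[:k]) for k in range(len(items))]
--     placeholders = ', '.join(
--         '(' + ', '.join('$%d' % (i + 1) for i in range(s, s + len(d))) + ')'
--         for d, s in zip(items, starts))
--     values = [v for d in items for v in d.values()]
--     keys = '(' + ', '.join(items[0].keys()) + ')'
--     return keys, placeholders, values
-- ===== Notes on version B (the rewrite author's own statement) =====
-- stated objective: idiomatic
-- what changed: Replaces A's single accumulator loop threading a running offset with a precomputed start-offset table plus range-driven placeholder joins; values are flattened by a separate comprehension instead of extend inside the loop.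
import Mathlib
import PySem

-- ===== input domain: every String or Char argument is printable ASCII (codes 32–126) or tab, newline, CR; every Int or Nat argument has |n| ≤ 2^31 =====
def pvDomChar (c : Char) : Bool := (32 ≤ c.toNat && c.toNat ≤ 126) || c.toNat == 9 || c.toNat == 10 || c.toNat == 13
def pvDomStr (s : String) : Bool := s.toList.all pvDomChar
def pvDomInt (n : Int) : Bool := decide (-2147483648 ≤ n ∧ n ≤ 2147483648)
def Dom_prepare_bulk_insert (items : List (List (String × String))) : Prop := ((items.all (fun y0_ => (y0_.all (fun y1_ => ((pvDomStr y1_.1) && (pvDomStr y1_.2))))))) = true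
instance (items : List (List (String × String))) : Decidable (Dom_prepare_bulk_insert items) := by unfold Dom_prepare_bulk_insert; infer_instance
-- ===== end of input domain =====

-- B replaces A's running-offset accumulator loop by a precomputed start-offset table and
-- range-driven placeholder joins (objective: idiomatic decomposition; not faster).


-- ===== PORT A =====
-- Literal port of A's loop: state (placeholders, values, offset); items[0].keys() is taken
-- from the head (Pre_ excludes [] where Python raises IndexError).
def prepare_bulk_insert (items : List (List (String × String))) : String × String × List String :=
  let st := items.foldl
    (fun (acc : List String × List String × Int) dic =>
      let numbers := (PySem.List.enumerate dic 0).map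
        (fun p => "$" ++ PySem.Int.toStr (acc.2.2 + p.1 + 1))
      let offset := acc.2.2 + (dic.length : Int)
      let numbersJ := PySem.Str.join ", " numbers
      (acc.1 ++ ["(" ++ numbersJ ++ ")"], acc.2.1 ++ dic.map Prod.snd, offset))
    ([], [], 0)
  let keys := "(" ++ PySem.Str.join ", " ((items.headD []).map Prod.fst) ++ ")"
  (keys, PySem.Str.join ", " st.1, st.2.1)

-- ===== PORT B =====
def prepare_bulk_insert_alt (items : List (List (String × String))) : String × String × List String :=
  let starts : List Int :=
    (List.range items.length).map (fun k => ((items.take k).map (fun d => (d.length : Int))).sum)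
  let placeholders := PySem.Str.join ", " ((items.zip starts).map
    (fun ds => "(" ++ PySem.Str.join ", "
        ((PySem.List.pyRange ds.2 (ds.2 + ds.1.length) 1).map (fun i => "$" ++ PySem.Int.toStr (i + 1)))
      ++ ")"))
  let values := items.flatMap (fun d => d.map Prod.snd)
  let keys := "(" ++ PySem.Str.join ", " ((items.headD []).map Prod.fst) ++ ")"
  (keys, placeholders, values)

-- ===== PRECONDITION & SPEC =====
-- Pre_ excludes only the empty list, on which Python's items[0] raises IndexError (in A and in B).
def Pre_prepare_bulk_insert (items : List (List (String × String))) : Prop := items ≠ []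
instance (items : List (List (String × String))) : Decidable (Pre_prepare_bulk_insert items) := by unfold Pre_prepare_bulk_insert; infer_instance
def pvWitness_prepare_bulk_insert : (List (List (String × String))) := [[("a", "1"), ("b", "2")], [("a", "3"), ("b", "4")]]

def Spec_prepare_bulk_insert (items : List (List (String × String))) (out : String × String × List String) : Prop := out = prepare_bulk_insert_alt items
instance (items : List (List (String × String))) (out : String × String × List String) : Decidable (Spec_prepare_bulk_insert items out) := by unfold Spec_prepare_bulk_insert; infer_instance

-- ===== CLAIM (what is proved, stated in full; the proofs are below) =====
def Claim_equal_prepare_bulk_insert : Prop := ∀ (items : List (List (String × String))), Dom_prepare_bulk_insert items → Pre_prepare_bulk_insert items → Spec_prepare_bulk_insert items (prepare_bulk_insert items)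

-- ===== LEMMAS AND PROOFS =====

-- the placeholder string of one dict at absolute offset `off`
def pbiPlac (off : Int) (d : List (String × String)) : String :=
  "(" ++ PySem.Str.join ", "
    ((List.range d.length).map (fun (k : Nat) => "$" ++ PySem.Int.toStr (off + (k : Int) + 1))) ++ ")"

-- the placeholder list of all dicts starting at offset `off`
def pbiPlacList (off : Int) : List (List (String × String)) → List String
  | [] => []
  | d :: t => pbiPlac off d :: pbiPlacList (off + d.length) t

theorem pbiEnumGen (d : List (String × String)) (s off : Int) :
    (PySem.List.enumerate d s).map (fun p => "$" ++ PySem.Int.toStr (off + p.1 + 1))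
    = (List.range d.length).map (fun (k : Nat) => "$" ++ PySem.Int.toStr (off + s + (k : Int) + 1)) := by
  induction d generalizing s off with
  | nil => simp [PySem.List.enumerate_nil]
  | cons x xs ih =>
    rw [PySem.List.enumerate_cons, List.map_cons, List.length_cons, List.range_succ_eq_map,
      List.map_cons, List.map_map, ih]
    congr 1
    · congr 2
      omega
    · refine List.map_congr_left ?_
      intro k _
      simp only [Function.comp_apply]
      congr 2
      push_cast
      ring

theorem pbiEnum (d : List (String × String)) (off : Int) :
    (PySem.List.enumerate d 0).map (fun p => "$" ++ PySem.Int.toStr (off + p.1 + 1))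
    = (List.range d.length).map (fun (k : Nat) => "$" ++ PySem.Int.toStr (off + (k : Int) + 1)) := by
  rw [pbiEnumGen d 0 off]
  simp

theorem pbiFoldA (items : List (List (String × String)))
    (pl vals : List String) (off : Int) :
    items.foldl
      (fun (acc : List String × List String × Int) dic =>
        let numbers := (PySem.List.enumerate dic 0).map
          (fun p => "$" ++ PySem.Int.toStr (acc.2.2 + p.1 + 1))
        let offset := acc.2.2 + (dic.length : Int)
        let numbersJ := PySem.Str.join ", " numbers
        (acc.1 ++ ["(" ++ numbersJ ++ ")"], acc.2.1 ++ dic.map Prod.snd, offset))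
      (pl, vals, off)
    = (pl ++ pbiPlacList off items,
       vals ++ items.flatMap (fun d => d.map Prod.snd),
       off + (items.map (fun d => (d.length : Int))).sum) := by
  induction items generalizing pl vals off with
  | nil => simp [pbiPlacList]
  | cons d t ih =>
    simp only [List.foldl_cons]
    rw [ih, pbiPlacList, pbiEnum]
    simp only [pbiPlac, List.flatMap_cons, List.map_cons, List.sum_cons,
      List.append_assoc, List.singleton_append, add_assoc]

theorem pbiPlacEq (off : Int) (d : List (String × String)) :
    "(" ++ PySem.Str.join ", "
        ((PySem.List.pyRange off (off + d.length) 1).map (fun i => "$" ++ PySem.Int.toStr (i + 1)))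
      ++ ")" = pbiPlac off d := by
  rw [PySem.List.pyRange_one, List.map_map, pbiPlac]
  have h1 : (off + (d.length : Int) - off).toNat = d.length := by omega
  rw [h1]
  rfl

theorem pbiMapB (items : List (List (String × String))) (off : Int) :
    (items.zip ((List.range items.length).map
        (fun k => off + ((items.take k).map (fun d => (d.length : Int))).sum))).map
      (fun ds => "(" ++ PySem.Str.join ", "
          ((PySem.List.pyRange ds.2 (ds.2 + ds.1.length) 1).map (fun i => "$" ++ PySem.Int.toStr (i + 1)))
        ++ ")")
    = pbiPlacList off items := by
  induction items generalizing off with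
  | nil => simp [pbiPlacList]
  | cons d t ih =>
    rw [List.length_cons, List.range_succ_eq_map, List.map_cons, List.map_map]
    have hmap : (List.range t.length).map
        ((fun k => off + (((d :: t).take k).map (fun d => (d.length : Int))).sum) ∘ Nat.succ)
        = (List.range t.length).map
        (fun k => (off + (d.length : Int)) + ((t.take k).map (fun d => (d.length : Int))).sum) := by
      refine List.map_congr_left ?_
      intro k _
      simp [List.take_succ_cons]
      ring
    rw [hmap, List.zip_cons_cons, List.map_cons, ih, pbiPlacList]
    simp [pbiPlacEq]

-- ===== VERDICT (by name: the statement is the Claim_ definition above) =====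
theorem prepare_bulk_insert_spec : Claim_equal_prepare_bulk_insert := by
  intro items _ _
  unfold Spec_prepare_bulk_insert prepare_bulk_insert prepare_bulk_insert_alt
  simp only [pbiFoldA, List.nil_append]
  have := pbiMapB items 0
  simp only [zero_add] at this
  rw [this]
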